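-- pv_equiv track=rewrite | github.com/sarthakbwj/CS50-P | plates/plates.py | are_numbers_at_end
-- ===== SOURCE A (Python) =====
-- def are_numbers_at_end(s):
--     number_found = False
--     for char in s:
--         if char.isdigit():
--             number_found = True
--         elif number_found:
--             return False
--     return True
-- ===== SOURCE B (Python) =====
-- def are_numbers_at_end(s):
--     # find the first digit; if there is one, everything from it on must be a digit
--     for i, c in enumerate(s):
--         if c.isdigit():
--             return all(ch.isdigit() for ch in s[i:])
--     return True
-- ===== Notes on version B (the rewrite author's own statement) =====
-- stated objective: alternative
-- what changed: Replaces the flag-carrying single pass with a two-phase decomposition: locate the first digit, then verify the whole suffix from it consists of digits.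
import Mathlib
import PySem

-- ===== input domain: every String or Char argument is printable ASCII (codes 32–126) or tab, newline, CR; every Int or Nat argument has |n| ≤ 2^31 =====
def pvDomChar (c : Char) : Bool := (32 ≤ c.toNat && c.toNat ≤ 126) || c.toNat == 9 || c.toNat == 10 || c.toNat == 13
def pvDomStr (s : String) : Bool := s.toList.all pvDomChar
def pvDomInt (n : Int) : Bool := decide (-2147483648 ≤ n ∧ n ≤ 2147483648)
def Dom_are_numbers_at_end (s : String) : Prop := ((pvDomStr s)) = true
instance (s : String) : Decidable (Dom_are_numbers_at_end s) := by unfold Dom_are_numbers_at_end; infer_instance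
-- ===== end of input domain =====

-- B differs only in decomposition (first-digit search + suffix check), not in value.

-- ===== PORT A =====
-- flag-carrying single pass: loop over chars keeping number_found
def pvLoopA : List Char → Bool → Bool
  | [], _ => true
  | c :: cs, numberFound =>
    if PySem.Chars.isdigit c then pvLoopA cs true
    else if numberFound then false
    else pvLoopA cs numberFound

def are_numbers_at_end (s : String) : Bool := pvLoopA s.toList false

-- ===== PORT B =====
-- all(ch.isdigit() for ch in t)
def pvAllDigits : List Char → Bool
  | [] => true
  | c :: cs => PySem.Chars.isdigit c && pvAllDigits cs

-- scan for the first digit; at it, check the suffix (including it) is all digits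
def pvLoopB : List Char → Bool
  | [] => true
  | c :: cs => if PySem.Chars.isdigit c then pvAllDigits (c :: cs) else pvLoopB cs

def are_numbers_at_end_alt (s : String) : Bool := pvLoopB s.toList

-- ===== PRECONDITION & SPEC =====
def Spec_are_numbers_at_end (s : String) (out : Bool) : Prop := out = are_numbers_at_end_alt s
instance (s : String) (out : Bool) : Decidable (Spec_are_numbers_at_end s out) := by unfold Spec_are_numbers_at_end; infer_instance

-- ===== CLAIM (what is proved, stated in full; the proofs are below) =====
def Claim_equal_are_numbers_at_end : Prop := ∀ (s : String), Dom_are_numbers_at_end s → Spec_are_numbers_at_end s (are_numbers_at_end s)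

-- ===== LEMMAS AND PROOFS =====

-- with the flag set, A's loop accepts exactly all-digit suffixes
theorem pvLoopA_true (cs : List Char) : pvLoopA cs true = pvAllDigits cs := by
  induction cs with
  | nil => rfl
  | cons c cs ih =>
    simp only [pvLoopA, pvAllDigits]
    by_cases h : PySem.Chars.isdigit c = true <;> simp [h, ih]

theorem pvLoopA_eq_pvLoopB (cs : List Char) : pvLoopA cs false = pvLoopB cs := by
  induction cs with
  | nil => rfl
  | cons c cs ih =>
    simp only [pvLoopA, pvLoopB]
    by_cases h : PySem.Chars.isdigit c = true <;>
      simp [h, ih, pvLoopA_true, pvAllDigits]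

-- ===== VERDICT (by name: the statement is the Claim_ definition above) =====
theorem are_numbers_at_end_spec : Claim_equal_are_numbers_at_end := by
  intro s _
  unfold Spec_are_numbers_at_end are_numbers_at_end are_numbers_at_end_alt
  exact pvLoopA_eq_pvLoopB s.toList
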